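-- pv_equiv track=rewrite | github.com/rahulsamant37/Daily-Task | Python/python_question_300.py | longest_increasing_subsequence_with_k_difference
-- ===== SOURCE A (Python) =====
-- def longest_increasing_subsequence_with_k_difference(nums, k):
--     """
--     Finds the length of the longest increasing subsequence where the difference
--     between consecutive elements is a multiple of k.
--
--     Args:
--         nums: A list of integers.
--         k: An integer representing the multiple difference.
--
--     Returns:
--         The length of the longest increasing subsequence.
--     """
--
--     if not nums:
--         return 0
--
--     n = len(nums)
--     # dp[i] stores the length of the longest increasing subsequence ending at nums[i].
--     dp = [1] * n
--
--     for i in range(1, n):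
--         for j in range(i):
--             # Check if nums[i] > nums[j] and if the difference is a multiple of k.
--             if nums[i] > nums[j] and (nums[i] - nums[j]) % k == 0:
--                 # Update dp[i] if we find a longer subsequence ending at nums[i].
--                 dp[i] = max(dp[i], dp[j] + 1)
--
--     # Return the maximum value in the dp array, which represents the length of the
--     # longest increasing subsequence.
--     return max(dp)
-- ===== SOURCE B (Python) =====
-- def longest_increasing_subsequence_with_k_difference(nums, k):
--     if not nums:
--         return 0
--     if k == 0:
--         # no positive difference is a multiple of 0, so no two elements chain
--         return 1
--     groups = {}
--     for x in nums:
--         groups.setdefault(x % k, []).append(x)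
--     best = 0
--     for g in groups.values():
--         seen = []  # (value, best chain length ending at that occurrence)
--         glen = 0
--         for x in g:
--             cur = 1 + max((l for v, l in seen if v < x), default=0)
--             seen.append((x, cur))
--             if cur > glen:
--                 glen = cur
--         if glen > best:
--             best = glen
--     return best
-- ===== Notes on version B (the rewrite author's own statement) =====
-- stated objective: faster
-- what changed: B builds a residue-class index (value mod k) once and computes an independent LIS fold per residue class over (value,length) pairs, so the quadratic scan over ALL previous elements shrinks to a scan within the element's own class; the answer is the max over classes.
-- crash fix: On k == 0 with two or more elements A raises ZeroDivisionError from '% k'; B returns 1, the length of the longest valid subsequence (no positive difference is a multiple of 0). — e.g. on longest_increasing_subsequence_with_k_difference([1, 2], 0): A raises ZeroDivisionError, B returns 1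
import Mathlib
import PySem

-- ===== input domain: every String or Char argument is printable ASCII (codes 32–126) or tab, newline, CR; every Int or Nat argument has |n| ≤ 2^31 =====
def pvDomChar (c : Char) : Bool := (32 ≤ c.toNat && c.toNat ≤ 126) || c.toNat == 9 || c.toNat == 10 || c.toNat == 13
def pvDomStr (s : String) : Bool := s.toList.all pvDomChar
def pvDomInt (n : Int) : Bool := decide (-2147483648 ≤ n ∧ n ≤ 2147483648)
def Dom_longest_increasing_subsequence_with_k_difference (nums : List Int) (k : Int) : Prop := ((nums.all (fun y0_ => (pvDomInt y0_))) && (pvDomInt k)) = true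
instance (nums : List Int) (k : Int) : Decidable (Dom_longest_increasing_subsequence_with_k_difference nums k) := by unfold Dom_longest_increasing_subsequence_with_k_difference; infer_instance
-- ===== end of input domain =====

-- B replaces A's all-pairs quadratic DP by a residue-class (value mod k) index built once, with an
-- independent LIS fold per class: the inner scan runs only over the element's own residue class
-- (objective: faster; measurably so when values spread over several classes, worst case unchanged).

-- ===== PORT A =====
def longest_increasing_subsequence_with_k_difference (nums : List Int) (k : Int) : Int :=
  if nums = [] then 0
  else
    let n : Int := PySem.List.len nums
    let dp : List Int := PySem.List.pyRepeat [(1 : Int)] n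
    let dp : List Int := (PySem.List.pyRange 1 n 1).foldl (fun dp i =>
      (PySem.List.pyRange 0 i 1).foldl (fun dp j =>
        if PySem.List.pyGetD nums i 0 > PySem.List.pyGetD nums j 0 ∧
           PySem.Int.mod (PySem.List.pyGetD nums i 0 - PySem.List.pyGetD nums j 0) k = 0 then
          PySem.List.pySetD dp i (max (PySem.List.pyGetD dp i 0) (PySem.List.pyGetD dp j 0 + 1))
        else dp) dp) dp
    (PySem.List.max? dp (fun x => x)).getD 0

-- ===== PORT B =====
-- inner loop of B: fold over the group keeping (seen pairs, running best)
def pvGroupLIS (g : List Int) : Int :=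
  (g.foldl (fun (st : List (Int × Int) × Int) x =>
      let cur : Int :=
        1 + (PySem.List.max? ((st.1.filter (fun p => decide (p.1 < x))).map (fun p => p.2))
              (fun l => l)).getD 0
      (st.1 ++ [(x, cur)], if cur > st.2 then cur else st.2)) ([], 0)).2

def longest_increasing_subsequence_with_k_difference_alt (nums : List Int) (k : Int) : Int :=
  if nums = [] then 0
  else if k = 0 then 1
  else
    let groups : PySem.Dict Int (List Int) := nums.foldl (fun d x =>
        d.modify (PySem.Int.mod x k) [] (fun g => g ++ [x])) PySem.Dict.empty
    (PySem.Dict.values groups).foldl (fun best g =>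
        let gl := pvGroupLIS g
        if gl > best then gl else best) 0

-- ===== PRECONDITION & SPEC =====
-- Pre_ excludes exactly the inputs where A raises ZeroDivisionError: k == 0 with at least two elements.
def Pre_longest_increasing_subsequence_with_k_difference (nums : List Int) (k : Int) : Prop :=
  k ≠ 0 ∨ nums.length ≤ 1
instance (nums : List Int) (k : Int) : Decidable (Pre_longest_increasing_subsequence_with_k_difference nums k) := by unfold Pre_longest_increasing_subsequence_with_k_difference; infer_instance

def pvWitness_longest_increasing_subsequence_with_k_difference : List Int × Int := ([1, 3, 2, 5, 7], 2)

-- On k == 0 with two or more elements A raises ZeroDivisionError from '% k'; B returns 1,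
-- the length of the longest valid subsequence (no positive difference is a multiple of 0).
def Raises_longest_increasing_subsequence_with_k_difference (nums : List Int) (k : Int) : Prop :=
  k = 0 ∧ 2 ≤ nums.length
instance (nums : List Int) (k : Int) : Decidable (Raises_longest_increasing_subsequence_with_k_difference nums k) := by unfold Raises_longest_increasing_subsequence_with_k_difference; infer_instance
def pvRaiseWitness_longest_increasing_subsequence_with_k_difference : List Int × Int := ([1, 2], 0)
def pvRaiseWitnessOut_longest_increasing_subsequence_with_k_difference : Int := 1

def Spec_longest_increasing_subsequence_with_k_difference (nums : List Int) (k : Int) (out : Int) : Prop := out = longest_increasing_subsequence_with_k_difference_alt nums k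
instance (nums : List Int) (k : Int) (out : Int) : Decidable (Spec_longest_increasing_subsequence_with_k_difference nums k out) := by unfold Spec_longest_increasing_subsequence_with_k_difference; infer_instance

-- ===== CLAIM (what is proved, stated in full; the proofs are below) =====
def Claim_equal_longest_increasing_subsequence_with_k_difference : Prop := ∀ (nums : List Int) (k : Int), Dom_longest_increasing_subsequence_with_k_difference nums k → Pre_longest_increasing_subsequence_with_k_difference nums k → Spec_longest_increasing_subsequence_with_k_difference nums k (longest_increasing_subsequence_with_k_difference nums k)

def Claim_raises_longest_increasing_subsequence_with_k_difference : Prop := (∀ (nums : List Int) (k : Int), Dom_longest_increasing_subsequence_with_k_difference nums k → Raises_longest_increasing_subsequence_with_k_difference nums k → ¬ Pre_longest_increasing_subsequence_with_k_difference nums k) ∧ (Dom_longest_increasing_subsequence_with_k_difference (pvRaiseWitness_longest_increasing_subsequence_with_k_difference.1) (pvRaiseWitness_longest_increasing_subsequence_with_k_difference.2) ∧ Raises_longest_increasing_subsequence_with_k_difference (pvRaiseWitness_longest_increasing_subsequence_with_k_difference.1) (pvRaiseWitness_longest_increasing_subsequence_with_k_difference.2) ∧ longest_increasing_subsequence_with_k_difference_alt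 (pvRaiseWitness_longest_increasing_subsequence_with_k_difference.1) (pvRaiseWitness_longest_increasing_subsequence_with_k_difference.2) = pvRaiseWitnessOut_longest_increasing_subsequence_with_k_difference)

-- ===== LEMMAS AND PROOFS =====

-- running max with default 0
def pvMax0 (ms : List Int) : Int := ms.foldl max 0

-- reference dp sequences: pairs (value, best chain length ending at that occurrence)
def pvStepK (k : Int) (seen : List (Int × Int)) (x : Int) : List (Int × Int) :=
  seen ++ [(x, 1 + pvMax0 ((seen.filter (fun p => decide (x > p.1 ∧ PySem.Int.mod (x - p.1) k = 0))).map (fun p => p.2)))]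

def pvSeenK (k : Int) (xs : List Int) : List (Int × Int) := xs.foldl (pvStepK k) []

def pvStepLt (seen : List (Int × Int)) (x : Int) : List (Int × Int) :=
  seen ++ [(x, 1 + pvMax0 ((seen.filter (fun p => decide (p.1 < x))).map (fun p => p.2)))]

def pvSeenLt (xs : List Int) : List (Int × Int) := xs.foldl pvStepLt []

lemma pvMax0_nonneg (ms : List Int) : 0 ≤ pvMax0 ms := (PySem.List.le_foldl_max ms 0).1

lemma pvMax0_append (ms : List Int) (s : Int) : pvMax0 (ms ++ [s]) = max (pvMax0 ms) s := by
  simp [pvMax0, List.foldl_append]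

lemma pvSeenK_append (k : Int) (xs : List Int) (x : Int) :
    pvSeenK k (xs ++ [x]) = pvStepK k (pvSeenK k xs) x := by
  simp [pvSeenK, List.foldl_append]

lemma pvSeenLt_append (xs : List Int) (x : Int) :
    pvSeenLt (xs ++ [x]) = pvStepLt (pvSeenLt xs) x := by
  simp [pvSeenLt, List.foldl_append]

lemma pvFoldlMax_eq (ms : List Int) (a : Int) (ha : 0 ≤ a) : ms.foldl max a = max a (pvMax0 ms) := by
  induction ms generalizing a with
  | nil => simp [pvMax0]; omega
  | cons m t ih =>
    simp only [List.foldl_cons, pvMax0]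
    rw [ih (max a m) (by omega), ih (max 0 m) (by omega)]
    have := pvMax0_nonneg t
    simp only [pvMax0] at *
    omega

lemma pvMaxD_eq (ms : List Int) (h : ∀ m ∈ ms, 0 ≤ m) :
    (PySem.List.max? ms (fun l => l)).getD 0 = pvMax0 ms := by
  cases ms with
  | nil => rfl
  | cons m t =>
    rw [PySem.List.max?_id_cons]
    have hm : 0 ≤ m := h m (by simp)
    simp only [Option.getD_some, pvMax0, List.foldl_cons]
    rw [pvFoldlMax_eq t m hm, pvFoldlMax_eq t (max 0 m) (by omega)]
    omega

lemma pvMax0_perm {l1 l2 : List Int} (h : l1.Perm l2) : pvMax0 l1 = pvMax0 l2 :=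
  List.Perm.foldl_eq (rcomm := ⟨fun a b c => by omega⟩) h 0

lemma pvMax0_flatten (Ls : List (List Int)) : pvMax0 Ls.flatten = pvMax0 (Ls.map pvMax0) := by
  induction Ls with
  | nil => rfl
  | cons L Ls ih =>
    simp only [List.flatten_cons, List.map_cons, pvMax0, List.foldl_append, List.foldl_cons]
    rw [pvFoldlMax_eq Ls.flatten (List.foldl max 0 L) (pvMax0_nonneg L),
        pvFoldlMax_eq (Ls.map pvMax0) (max 0 (List.foldl max 0 L)) (by have := pvMax0_nonneg L; simp only [pvMax0] at *; omega)]
    simp only [pvMax0] at ih ⊢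
    rw [ih]
    have h1 : (0:Int) ≤ List.foldl max 0 L := pvMax0_nonneg L
    omega

lemma pvSeenK_fst (k : Int) (xs : List Int) : (pvSeenK k xs).map (fun p => p.1) = xs := by
  induction xs using List.reverseRecOn with
  | nil => rfl
  | append_singleton xs x ih =>
    rw [pvSeenK_append]
    simp [pvStepK, ih]

lemma pvSeenK_snd_pos (k : Int) (xs : List Int) : ∀ p ∈ pvSeenK k xs, 1 ≤ p.2 := by
  induction xs using List.reverseRecOn with
  | nil => simp [pvSeenK]
  | append_singleton xs x ih =>
    rw [pvSeenK_append]
    intro p hp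
    simp only [pvStepK, List.mem_append, List.mem_singleton] at hp
    rcases hp with hp | rfl
    · exact ih p hp
    · have h := pvMax0_nonneg (((pvSeenK k xs).filter (fun p => decide (x > p.1 ∧ PySem.Int.mod (x - p.1) k = 0))).map (fun p => p.2))
      show (1:Int) ≤ 1 + pvMax0 (((pvSeenK k xs).filter (fun p => decide (x > p.1 ∧ PySem.Int.mod (x - p.1) k = 0))).map (fun p => p.2))
      omega

lemma pvSeenLt_snd_pos (xs : List Int) : ∀ p ∈ pvSeenLt xs, 1 ≤ p.2 := by
  induction xs using List.reverseRecOn with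
  | nil => simp [pvSeenLt]
  | append_singleton xs x ih =>
    rw [pvSeenLt_append]
    intro p hp
    simp only [pvStepLt, List.mem_append, List.mem_singleton] at hp
    rcases hp with hp | rfl
    · exact ih p hp
    · have h := pvMax0_nonneg (((pvSeenLt xs).filter (fun p => decide (p.1 < x))).map (fun p => p.2))
      show (1:Int) ≤ 1 + pvMax0 (((pvSeenLt xs).filter (fun p => decide (p.1 < x))).map (fun p => p.2))
      omega

lemma pvB_aux (g : List Int) :
    (g.foldl (fun (st : List (Int × Int) × Int) x =>
      let cur : Int :=
        1 + (PySem.List.max? ((st.1.filter (fun p => decide (p.1 < x))).map (fun p => p.2))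
              (fun l => l)).getD 0
      (st.1 ++ [(x, cur)], if cur > st.2 then cur else st.2)) ([], 0))
    = (pvSeenLt g, pvMax0 ((pvSeenLt g).map (fun p => p.2))) := by
  induction g using List.reverseRecOn with
  | nil => rfl
  | append_singleton g x ih =>
    rw [List.foldl_append, ih, List.foldl_cons, List.foldl_nil]
    have hpos : ∀ m ∈ ((pvSeenLt g).filter (fun p => decide (p.1 < x))).map (fun p => p.2), 0 ≤ m := by
      intro m hm
      obtain ⟨p, hp, rfl⟩ := List.mem_map.1 hm
      have := pvSeenLt_snd_pos g p (List.mem_filter.1 hp).1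
      omega
    rw [pvSeenLt_append]
    simp only [pvMaxD_eq _ hpos, pvStepLt, List.map_append, List.map_cons, List.map_nil, pvMax0_append]
    rw [Prod.mk.injEq]
    refine ⟨rfl, ?_⟩
    omega

lemma pvModEq (k v x : Int) (hk : k ≠ 0) :
    PySem.Int.mod (x - v) k = 0 ↔ PySem.Int.mod x k = PySem.Int.mod v k := by
  rw [PySem.Int.mod_eq_zero_iff_dvd]
  have ex := PySem.Int.floordiv_mul_add_mod x k
  have ev := PySem.Int.floordiv_mul_add_mod v k
  constructor
  · intro h
    have hd : k ∣ (PySem.Int.mod x k - PySem.Int.mod v k) := by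
      obtain ⟨c, hc⟩ := h
      exact ⟨c - (PySem.Int.floordiv x k - PySem.Int.floordiv v k), by linarith [hc]⟩
    rcases lt_or_gt_of_ne hk with hneg | hpos
    · have b1 := PySem.Int.mod_neg_bounds x hneg
      have b2 := PySem.Int.mod_neg_bounds v hneg
      have := Int.eq_zero_of_abs_lt_dvd ((neg_dvd).2 hd) (by rw [abs_lt]; omega)
      omega
    · have b1 := PySem.Int.mod_nonneg x hpos
      have b2 := PySem.Int.mod_lt x hpos
      have b3 := PySem.Int.mod_nonneg v hpos
      have b4 := PySem.Int.mod_lt v hpos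
      have := Int.eq_zero_of_abs_lt_dvd hd (by rw [abs_lt]; omega)
      omega
  · intro h
    exact ⟨PySem.Int.floordiv x k - PySem.Int.floordiv v k, by linarith⟩

lemma pvGroup (k : Int) (hk : k ≠ 0) (xs : List Int) (r : Int) :
    (pvSeenK k xs).filter (fun p => PySem.Int.mod p.1 k == r)
    = pvSeenLt (xs.filter (fun x => PySem.Int.mod x k == r)) := by
  induction xs using List.reverseRecOn with
  | nil => rfl
  | append_singleton xs x ih =>
    rw [pvSeenK_append, List.filter_append]
    by_cases hr : PySem.Int.mod x k = r
    · have hfilt : (pvSeenK k xs).filter (fun p => decide (x > p.1 ∧ PySem.Int.mod (x - p.1) k = 0))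
          = ((pvSeenK k xs).filter (fun p => PySem.Int.mod p.1 k == r)).filter (fun p => decide (p.1 < x)) := by
        rw [List.filter_filter]
        apply List.filter_congr
        intro p _
        rw [Bool.eq_iff_iff]
        simp only [decide_eq_true_eq, Bool.and_eq_true, beq_iff_eq]
        have hiff := pvModEq k p.1 x hk
        constructor
        · rintro ⟨h1, h2⟩
          exact ⟨h1, (hiff.1 h2).symm.trans hr⟩
        · rintro ⟨h1, h2⟩
          exact ⟨h1, hiff.2 (hr.trans h2.symm)⟩
      have hx1 : List.filter (fun x => PySem.Int.mod x k == r) [x] = [x] := by simp [hr]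
      rw [hx1, pvSeenLt_append, pvStepLt, ← ih, pvStepK, List.filter_append, hfilt]
      simp [hr]
    · rw [pvStepK, List.filter_append]
      have h1 : List.filter (fun p => PySem.Int.mod p.1 k == r) [(x, 1 + pvMax0 ((List.filter (fun p => decide (x > p.1 ∧ PySem.Int.mod (x - p.1) k = 0)) (pvSeenK k xs)).map (fun p => p.2)))] = [] := by
        simp [hr]
      have h2 : List.filter (fun x => PySem.Int.mod x k == r) [x] = [] := by
        simp [hr]
      rw [h1, h2, List.append_nil, List.append_nil, ih]

lemma pvFlattenPerm {α : Type} (f : α → Int) (R : List Int) (hnd : R.Nodup) :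
    ∀ l : List α, (∀ a ∈ l, f a ∈ R) →
      ((R.map (fun r => l.filter (fun a => f a == r))).flatten).Perm l := by
  induction R with
  | nil =>
    intro l hcov
    cases l with
    | nil => simp
    | cons a t => exact absurd (hcov a (by simp)) (by simp)
  | cons r R' ih =>
    intro l hcov
    rw [List.map_cons, List.flatten_cons]
    have hnd' : R'.Nodup := hnd.of_cons
    have hrR : r ∉ R' := by simp at hnd; exact hnd.1
    have hmaps : R'.map (fun r' => l.filter (fun a => f a == r'))
        = R'.map (fun r' => (l.filter (fun a => !(f a == r))).filter (fun a => f a == r')) := by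
      apply List.map_congr_left
      intro r' hr'
      rw [List.filter_filter]
      apply List.filter_congr
      intro a _
      rw [Bool.eq_iff_iff]
      simp only [Bool.and_eq_true, beq_iff_eq, Bool.not_eq_true', beq_eq_false_iff_ne, ne_eq]
      constructor
      · intro h1
        exact ⟨h1, by rintro rfl; exact hrR (h1 ▸ hr')⟩
      · rintro ⟨h1, _⟩
        exact h1
    have hperm := ih hnd' (l.filter (fun a => !(f a == r))) (by
      intro a ha
      have h1 := (List.mem_filter.1 ha).1
      have h2 := (List.mem_filter.1 ha).2
      have := hcov a h1
      simp only [Bool.not_eq_true', beq_eq_false_iff_ne, ne_eq] at h2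
      simp only [List.mem_cons] at this
      tauto)
    rw [hmaps]
    exact List.Perm.trans (List.Perm.append_left _ hperm) (List.filter_append_perm _ l)

lemma pvMax0_partition {α : Type} (f : α → Int) (g : α → Int) (R : List Int) (hnd : R.Nodup)
    (l : List α) (hcov : ∀ a ∈ l, f a ∈ R) :
    pvMax0 (R.map (fun r => pvMax0 ((l.filter (fun a => f a == r)).map g))) = pvMax0 (l.map g) := by
  have h1 : R.map (fun r => pvMax0 ((l.filter (fun a => f a == r)).map g))
      = (R.map (fun r => (l.filter (fun a => f a == r)).map g)).map pvMax0 := by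
    rw [List.map_map]; rfl
  have h2 : R.map (fun r => (l.filter (fun a => f a == r)).map g)
      = (R.map (fun r => l.filter (fun a => f a == r))).map (List.map g) := by
    rw [List.map_map]; rfl
  rw [h1, ← pvMax0_flatten, h2, ← List.map_flatten]
  exact pvMax0_perm ((pvFlattenPerm f R hnd l hcov).map g)

lemma pvInner (nums : List Int) (k x : Int) (S : List (Int × Int)) (rest : List Int) (i : Nat)
    (hfst : S.map (fun p => p.1) = nums.take i) (hlen : S.length = i) (hi : i < nums.length)
    (hx : nums[i] = x) :
    ∀ t : Nat, t ≤ i →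
    (PySem.List.pyRange 0 (t : Int) 1).foldl
      (fun dp j =>
        if PySem.List.pyGetD nums (i : Int) 0 > PySem.List.pyGetD nums j 0 ∧
           PySem.Int.mod (PySem.List.pyGetD nums (i : Int) 0 - PySem.List.pyGetD nums j 0) k = 0 then
          PySem.List.pySetD dp (i : Int)
            (max (PySem.List.pyGetD dp (i : Int) 0) (PySem.List.pyGetD dp j 0 + 1))
        else dp)
      (S.map (fun p => p.2) ++ 1 :: rest)
    = S.map (fun p => p.2) ++
        (1 + pvMax0 (((S.take t).filter
            (fun p => decide (x > p.1 ∧ PySem.Int.mod (x - p.1) k = 0))).map (fun p => p.2))) :: rest := by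
  intro t
  induction t with
  | zero =>
    intro _
    rw [show ((0:Nat):Int) = 0 by norm_num, PySem.List.pyRange_one_eq_nil (by omega)]
    simp [pvMax0]
  | succ t iht =>
    intro ht
    have ht' : t ≤ i := by omega
    have hti : t < i := by omega
    have htn : t < nums.length := by omega
    rw [show ((t+1:Nat):Int) = (t:Int)+1 by push_cast; ring,
        PySem.List.pyRange_one_succ_right (by positivity), List.foldl_append, iht ht',
        List.foldl_cons, List.foldl_nil]
    have htS : t < S.length := by omega
    have hSmap : (S.map (fun p => p.2)).length = i := by simp [hlen]
    have hgi : PySem.List.pyGetD nums (i : Int) 0 = x := by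
      rw [PySem.List.pyGetD_natCast, List.getD_eq_getElem _ _ hi, hx]
    have hSt1 : S[t].1 = nums[t] := by
      have e := List.getElem_of_eq hfst (by simpa using htS)
      rw [List.getElem_map] at e
      rw [e, List.getElem_take]
    have hgt : PySem.List.pyGetD nums ((t : Nat) : Int) 0 = S[t].1 := by
      rw [PySem.List.pyGetD_natCast, List.getD_eq_getElem _ _ htn, hSt1]
    set M : Int := pvMax0 (((S.take t).filter
        (fun p => decide (x > p.1 ∧ PySem.Int.mod (x - p.1) k = 0))).map (fun p => p.2)) with hM
    have hdpt : PySem.List.pyGetD (S.map (fun p => p.2) ++ (1 + M) :: rest) ((t : Nat) : Int) 0 = S[t].2 := by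
      rw [PySem.List.pyGetD_natCast, List.getD_eq_getElem?_getD, List.getElem?_append_left (by omega),
          List.getElem?_map]
      simp [htS]
    have hdpi : PySem.List.pyGetD (S.map (fun p => p.2) ++ (1 + M) :: rest) ((i : Nat) : Int) 0 = 1 + M := by
      rw [PySem.List.pyGetD_natCast, List.getD_eq_getElem?_getD,
          List.getElem?_append_right (by omega)]
      simp [hSmap]
    have hset : ∀ v : Int, PySem.List.pySetD (S.map (fun p => p.2) ++ (1 + M) :: rest) ((i : Nat) : Int) v
        = S.map (fun p => p.2) ++ v :: rest := by
      intro v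
      rw [PySem.List.pySetD_natCast, List.set_append]
      simp [hSmap]
    have htake : S.take (t+1) = S.take t ++ [S[t]] := List.take_succ_eq_append_getElem htS
    rw [hgi, hgt, hdpt, hdpi, htake, List.filter_append]
    by_cases hc : x > S[t].1 ∧ PySem.Int.mod (x - S[t].1) k = 0
    · rw [if_pos hc, hset]
      have hfs : List.filter (fun p => decide (x > p.1 ∧ PySem.Int.mod (x - p.1) k = 0)) [S[t]] = [S[t]] := by
        simp [hc]
      rw [hfs]
      simp only [List.map_append, List.map_cons, List.map_nil]
      rw [pvMax0_append]
      congr 1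
      congr 1
      omega
    · rw [if_neg hc]
      have hfs : List.filter (fun p => decide (x > p.1 ∧ PySem.Int.mod (x - p.1) k = 0)) [S[t]] = [] := by
        simp only [List.filter_cons, List.filter_nil]
        rw [decide_eq_false hc]
        rfl
      rw [hfs, List.append_nil]

lemma pvOuter (nums : List Int) (k : Int) (c : Nat) (hc : c < nums.length) :
    (PySem.List.pyRange 1 ((c : Int) + 1) 1).foldl
      (fun dp i =>
        (PySem.List.pyRange 0 i 1).foldl
          (fun dp j =>
            if PySem.List.pyGetD nums i 0 > PySem.List.pyGetD nums j 0 ∧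
               PySem.Int.mod (PySem.List.pyGetD nums i 0 - PySem.List.pyGetD nums j 0) k = 0 then
              PySem.List.pySetD dp i
                (max (PySem.List.pyGetD dp i 0) (PySem.List.pyGetD dp j 0 + 1))
            else dp) dp)
      (List.replicate nums.length 1)
    = (pvSeenK k (nums.take (c + 1))).map (fun p => p.2) ++
        List.replicate (nums.length - (c + 1)) 1 := by
  induction c with
  | zero =>
    rw [show ((0:Nat):Int) + 1 = 1 by norm_num, PySem.List.pyRange_one_eq_nil (by omega), List.foldl_nil]
    cases nums with
    | nil => simp at hc
    | cons a l =>
      have h1 : (a :: l).take 1 = [a] := rfl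
      rw [h1]
      have h2 : pvSeenK k [a] = [(a, 1)] := by
        simp [pvSeenK, pvStepK, pvMax0]
      rw [h2]
      simp [List.replicate_succ]
  | succ c ih =>
    have hc' : c < nums.length := by omega
    have e1 : ((c + 1 : Nat) : Int) + 1 = ((c : Int) + 1) + 1 := by push_cast; ring
    rw [e1, PySem.List.pyRange_one_succ_right (by omega), List.foldl_append, ih hc',
        List.foldl_cons, List.foldl_nil]
    set S := pvSeenK k (nums.take (c + 1)) with hS
    have hfst : S.map (fun p => p.1) = nums.take (c + 1) := pvSeenK_fst k _
    have hlen : S.length = c + 1 := by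
      have := congrArg List.length hfst
      simpa [List.length_take, Nat.min_eq_left (by omega : c + 1 ≤ nums.length)] using this
    have hrep : List.replicate (nums.length - (c + 1)) (1:Int)
        = 1 :: List.replicate (nums.length - (c + 2)) 1 := by
      rw [show nums.length - (c+1) = (nums.length - (c+2)) + 1 by omega, List.replicate_succ]
    have e2 : ((c : Int) + 1) = ((c + 1 : Nat) : Int) := by push_cast; ring
    rw [hrep, e2]
    rw [pvInner nums k (nums[c+1]) S (List.replicate (nums.length - (c + 2)) 1) (c+1) hfst hlen hc rfl (c+1) (le_refl _)]
    have htake : nums.take (c+2) = nums.take (c+1) ++ [nums[c+1]] := List.take_succ_eq_append_getElem hc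
    rw [htake, pvSeenK_append, pvStepK, ← hS, List.take_of_length_le (le_of_eq hlen), List.map_append]
    simp

lemma pvGroupLIS_eq (g : List Int) :
    pvGroupLIS g = pvMax0 ((pvSeenLt g).map (fun p => p.2)) := by
  unfold pvGroupLIS
  rw [pvB_aux]

lemma pvA_char (nums : List Int) (k : Int) (h : nums ≠ []) :
    longest_increasing_subsequence_with_k_difference nums k
    = pvMax0 ((pvSeenK k nums).map (fun p => p.2)) := by
  unfold longest_increasing_subsequence_with_k_difference
  rw [if_neg h]
  simp only [PySem.List.len_eq, PySem.List.pyRepeat_singleton, Int.toNat_natCast]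
  have hL : 1 ≤ nums.length := List.length_pos_iff.2 h
  have e : (nums.length : Int) = ((nums.length - 1 : Nat) : Int) + 1 := by omega
  rw [e, pvOuter nums k (nums.length - 1) (by omega),
      show nums.length - 1 + 1 = nums.length by omega,
      List.take_length, Nat.sub_self, List.replicate_zero, List.append_nil]
  apply pvMaxD_eq
  intro m hm
  obtain ⟨p, hp, rfl⟩ := List.mem_map.1 hm
  have := pvSeenK_snd_pos k nums p hp
  omega

lemma pvAlt_char (nums : List Int) (k : Int) (h : nums ≠ []) (hk : k ≠ 0) :
    longest_increasing_subsequence_with_k_difference_alt nums k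
    = pvMax0 ((pvSeenK k nums).map (fun p => p.2)) := by
  unfold longest_increasing_subsequence_with_k_difference_alt
  rw [if_neg h, if_neg hk]
  set d := nums.foldl (fun d x => d.modify (PySem.Int.mod x k) [] (fun g => g ++ [x])) PySem.Dict.empty with hd
  have hkeys : d.keys = PySem.Set.ofList (nums.map (fun x => PySem.Int.mod x k)) := by
    rw [hd, PySem.Dict.keys_foldl_modify_key nums (fun x => PySem.Int.mod x k) [] (fun _ x => fun g => g ++ [x]) PySem.Dict.empty]
    rw [show (PySem.Dict.empty : PySem.Dict Int (List Int)).keys = [] from rfl, PySem.Set.update_nil_left]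
  have hnd : d.keys.Nodup := by rw [hkeys]; exact PySem.Set.nodup_ofList _
  have hgetD : ∀ r, d.getD r [] = nums.filter (fun x => PySem.Int.mod x k == r) := by
    intro r
    have e : d = (nums.map (fun x => (PySem.Int.mod x k, x))).foldl
        (fun d p => d.modify p.1 [] (fun g => g ++ [p.2])) PySem.Dict.empty := by
      rw [hd, List.foldl_map]
    rw [e, PySem.Dict.getD_foldl_modify_append,
        show (PySem.Dict.empty : PySem.Dict Int (List Int)).getD r [] = [] from rfl,
        List.nil_append, List.filter_map, List.map_map]
    simp [Function.comp_def]
  have hvalues : d.values = d.keys.map (fun r => d.getD r []) := by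
    show d.items.map (fun p => p.2) = _
    rw [PySem.Dict.items_eq_map_keys d hnd [], List.map_map]
    rfl
  show d.values.foldl (fun best g => let gl := pvGroupLIS g; if gl > best then gl else best) 0
    = pvMax0 ((pvSeenK k nums).map (fun p => p.2))
  rw [hvalues, List.foldl_map]
  have hcong := PySem.List.foldl_congr_mem (l := d.keys) (init := (0:Int))
      (f := fun best r => let gl := pvGroupLIS (d.getD r []); if gl > best then gl else best)
      (g := fun best r => max best (pvMax0 (((pvSeenK k nums).filter
          (fun p => PySem.Int.mod p.1 k == r)).map (fun p => p.2))))
      (by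
        intro acc r _
        show (let gl := pvGroupLIS (d.getD r []); if gl > acc then gl else acc) = _
        rw [show pvGroupLIS (d.getD r []) = pvMax0 (((pvSeenK k nums).filter
            (fun p => PySem.Int.mod p.1 k == r)).map (fun p => p.2)) by
          rw [hgetD r, pvGroupLIS_eq, ← pvGroup k hk nums r]]
        show (if pvMax0 (((pvSeenK k nums).filter
            (fun p => PySem.Int.mod p.1 k == r)).map (fun p => p.2)) > acc
          then pvMax0 (((pvSeenK k nums).filter
            (fun p => PySem.Int.mod p.1 k == r)).map (fun p => p.2)) else acc)
          = max acc (pvMax0 (((pvSeenK k nums).filter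
            (fun p => PySem.Int.mod p.1 k == r)).map (fun p => p.2)))
        omega)
  rw [hcong,
      ← List.foldl_map (f := fun r => pvMax0 (((pvSeenK k nums).filter
          (fun p => PySem.Int.mod p.1 k == r)).map (fun p => p.2))) (g := max), hkeys]
  exact pvMax0_partition (fun p => PySem.Int.mod p.1 k) (fun p => p.2) _
    (PySem.Set.nodup_ofList _) (pvSeenK k nums)
    (by
      intro p hp
      apply (PySem.Set.mem_ofList _ _).2
      have h1 : p.1 ∈ nums := by
        rw [← pvSeenK_fst k nums]
        exact List.mem_map_of_mem hp
      exact List.mem_map_of_mem (f := fun x => PySem.Int.mod x k) h1)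

lemma pvSingle (a k : Int) : longest_increasing_subsequence_with_k_difference [a] k = 1 := by
  rfl

-- ===== VERDICT (by name: the statement is the Claim_ definition above) =====
theorem longest_increasing_subsequence_with_k_difference_spec : Claim_equal_longest_increasing_subsequence_with_k_difference := by
  intro nums k _ hpre
  unfold Spec_longest_increasing_subsequence_with_k_difference
  by_cases h0 : nums = []
  · subst h0; rfl
  · by_cases hk : k = 0
    · subst hk
      unfold Pre_longest_increasing_subsequence_with_k_difference at hpre
      obtain ⟨a, rfl⟩ : ∃ a, nums = [a] := by
        cases nums with
        | nil => exact absurd rfl h0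
        | cons a t =>
          cases t with
          | nil => exact ⟨a, rfl⟩
          | cons b t' => simp at hpre
      rw [pvSingle]; rfl
    · rw [pvA_char nums k h0, pvAlt_char nums k h0 hk]

@[simp]
theorem longest_increasing_subsequence_with_k_difference_raises : Claim_raises_longest_increasing_subsequence_with_k_difference := by
  unfold Claim_raises_longest_increasing_subsequence_with_k_difference
  exact ⟨by intro nums k _ hr; unfold Raises_longest_increasing_subsequence_with_k_difference at hr; unfold Pre_longest_increasing_subsequence_with_k_difference; omega, by decide⟩
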